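-- pv_equiv track=rewrite | github.com/pythagorean/OMF | matrix/square/integer/str.py | _str_format_matrix
-- ===== SOURCE A (Python) =====
-- def _str_format_matrix(matrix):
--     formatted_matrix = [
--         [str(element) for element in row]
--         for row in matrix
--     ]
--     max_lengths = [
--         max(len(element) for element in column)
--         for column in zip(*formatted_matrix)
--     ]
--     return max_lengths, formatted_matrix
-- ===== SOURCE B (Python) =====
-- def _str_format_matrix(matrix):
--     # single fused pass: stringify each row and update running per-column maxima
--     n = min(map(len, matrix), default=0)
--     max_lengths = [0] * n
--     formatted_matrix = []
--     for row in matrix: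
--         srow = [str(element) for element in row]
--         formatted_matrix.append(srow)
--         max_lengths = [len(s) if len(s) > a else a
--                        for a, s in zip(max_lengths, srow)]
--     return max_lengths, formatted_matrix
-- ===== Notes on version B (the rewrite author's own statement) =====
-- stated objective: alternative
-- what changed: Replaces the two-pass zip(*rows) transpose-then-max with a single fused pass that stringifies each row and updates running per-column maxima (column count = minimum row length).
import Mathlib
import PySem

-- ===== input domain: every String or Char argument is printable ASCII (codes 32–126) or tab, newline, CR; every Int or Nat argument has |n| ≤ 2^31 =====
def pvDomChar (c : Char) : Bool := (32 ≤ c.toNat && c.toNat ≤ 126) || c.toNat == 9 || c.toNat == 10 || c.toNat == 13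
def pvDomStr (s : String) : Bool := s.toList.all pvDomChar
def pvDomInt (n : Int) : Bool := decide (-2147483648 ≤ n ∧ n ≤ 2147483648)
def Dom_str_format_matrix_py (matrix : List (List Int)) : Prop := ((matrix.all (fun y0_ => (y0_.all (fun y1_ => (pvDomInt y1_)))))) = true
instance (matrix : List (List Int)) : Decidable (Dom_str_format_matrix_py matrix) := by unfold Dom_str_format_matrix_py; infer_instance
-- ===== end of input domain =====

-- B fuses A's two passes (stringify, then zip(*)-transpose + per-column max) into one
-- pass that keeps running per-column maxima; return value is identical.

-- ===== PORT A =====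
-- max(len(e) for e in column): Python max over a generator; the [] branch is unreachable
-- (every column produced by zip(* ) is nonempty) and only makes the function total.
def pvGenMax (l : List Int) : Int :=
  match l with
  | [] => 0
  | h :: t => t.foldl max h

def str_format_matrix_py (matrix : List (List Int)) : List Int × List (List String) :=
  let formatted := matrix.map (fun row => row.map PySem.Int.toStr)
  -- zip(*formatted): truncates to the shortest row; zip() of no rows is empty
  let n := ((formatted.map List.length).min?).getD 0
  let columns := (List.range n).map (fun j => formatted.map (fun r => r.getD j ""))
  let maxLengths := columns.map (fun col => pvGenMax (col.map PySem.Str.len))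
  (maxLengths, formatted)

-- ===== PORT B =====
-- min(map(len, matrix), default=0)
def pvMinLen (matrix : List (List Int)) : Nat :=
  match matrix.map List.length with
  | [] => 0
  | h :: t => t.foldl min h

def str_format_matrix_py_alt (matrix : List (List Int)) : List Int × List (List String) :=
  let n := pvMinLen matrix
  matrix.foldl
    (fun (st : List Int × List (List String)) row =>
      let srow := row.map PySem.Int.toStr
      (List.zipWith (fun a s => if PySem.Str.len s > a then PySem.Str.len s else a) st.1 srow,
       st.2 ++ [srow]))
    (List.replicate n 0, [])

-- ===== PRECONDITION & SPEC =====
def Spec_str_format_matrix_py (matrix : List (List Int)) (out : List Int × List (List String)) : Prop := out = str_format_matrix_py_alt matrix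
instance (matrix : List (List Int)) (out : List Int × List (List String)) : Decidable (Spec_str_format_matrix_py matrix out) := by unfold Spec_str_format_matrix_py; infer_instance

-- ===== CLAIM (what is proved, stated in full; the proofs are below) =====
def Claim_equal_str_format_matrix_py : Prop := ∀ (matrix : List (List Int)), Dom_str_format_matrix_py matrix → Spec_str_format_matrix_py matrix (str_format_matrix_py matrix)

-- ===== LEMMAS AND PROOFS =====

theorem pv_upd_eq_max (a b : Int) : (if b > a then b else a) = max a b := by
  split <;> omega

-- the pure per-column fold that B's zipWith step amounts to
def pvZipUpd (a : List Int) (r : List String) : List Int :=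
  List.zipWith (fun a s => if PySem.Str.len s > a then PySem.Str.len s else a) a r

theorem pv_fold_pair (rows : List (List String)) (a : List Int) (acc : List (List String)) :
    rows.foldl
      (fun (st : List Int × List (List String)) srow =>
        (List.zipWith (fun a s => if PySem.Str.len s > a then PySem.Str.len s else a) st.1 srow,
         st.2 ++ [srow]))
      (a, acc)
    = (rows.foldl pvZipUpd a, acc ++ rows) := by
  induction rows generalizing a acc with
  | nil => simp
  | cons r rs ih =>
    simp only [List.foldl_cons]
    rw [ih]
    simp [pvZipUpd]

theorem pv_fold_len (rows : List (List String)) (a : List Int)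
    (h : ∀ r ∈ rows, a.length ≤ r.length) :
    (rows.foldl pvZipUpd a).length = a.length := by
  induction rows generalizing a with
  | nil => rfl
  | cons r rs ih =>
    have hr : a.length ≤ r.length := h r (by simp)
    have hlen : (pvZipUpd a r).length = a.length := by
      simp [pvZipUpd, List.length_zipWith]; omega
    rw [List.foldl_cons, ih _ (by intro x hx; rw [hlen]; exact h x (by simp [hx]))]
    exact hlen

theorem pv_fold_get (rows : List (List String)) (a : List Int)
    (h : ∀ r ∈ rows, a.length ≤ r.length)
    (j : Nat) (hj : j < a.length) :
    (rows.foldl pvZipUpd a).getD j 0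
      = rows.foldl (fun m r => max m (PySem.Str.len (r.getD j ""))) (a.getD j 0) := by
  induction rows generalizing a with
  | nil => rfl
  | cons r rs ih =>
    have hr : a.length ≤ r.length := h r (by simp)
    have hlen : (pvZipUpd a r).length = a.length := by
      simp [pvZipUpd, List.length_zipWith]; omega
    have h' : ∀ x ∈ rs, (pvZipUpd a r).length ≤ x.length := by
      intro x hx; rw [hlen]; exact h x (by simp [hx])
    rw [List.foldl_cons, List.foldl_cons, ih (pvZipUpd a r) h' (by omega)]
    congr 1
    have hjr : j < r.length := by omega
    rw [List.getD_eq_getElem _ _ (by omega : j < (pvZipUpd a r).length),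
        List.getD_eq_getElem _ _ hj, List.getD_eq_getElem _ _ hjr]
    simp [pvZipUpd, List.getElem_zipWith, pv_upd_eq_max]

theorem pv_foldl_min_le (l : List Nat) (init : Nat) :
    l.foldl min init ≤ init ∧ ∀ x ∈ l, l.foldl min init ≤ x := by
  induction l generalizing init with
  | nil => simp
  | cons h t ih =>
    have := ih (min init h)
    refine ⟨le_trans this.1 (by omega), ?_⟩
    intro x hx
    rcases List.mem_cons.mp hx with rfl | hx
    · exact le_trans this.1 (by omega)
    · exact this.2 x hx

theorem pv_minLen_le (matrix : List (List Int)) :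
    ∀ r ∈ matrix, pvMinLen matrix ≤ r.length := by
  intro r hr
  cases matrix with
  | nil => cases hr
  | cons m ms =>
    unfold pvMinLen
    simp only [List.map_cons]
    rcases List.mem_cons.mp hr with rfl | hr
    · exact (pv_foldl_min_le (ms.map List.length) r.length).1
    · exact (pv_foldl_min_le (ms.map List.length) m.length).2 r.length
        (List.mem_map_of_mem hr)

theorem pv_len_nonneg (s : String) : 0 ≤ PySem.Str.len s := by
  simp [PySem.Str.len_eq]

theorem pv_minLen_eq (matrix : List (List Int)) :
    (((matrix.map (fun row => row.map PySem.Int.toStr)).map List.length).min?).getD 0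
      = pvMinLen matrix := by
  cases matrix with
  | nil => rfl
  | cons m ms =>
    show ((((m.map PySem.Int.toStr).length :: (ms.map (fun row => row.map PySem.Int.toStr)).map List.length)).min?).getD 0 = _
    unfold pvMinLen
    show List.foldl min _ _ = List.foldl min _ _
    simp [List.map_map, Function.comp_def]

theorem pv_foldl_max_map (cs : List (List String)) (j : Nat) (x : Int) :
    ((cs.map (fun r => r.getD j "")).map PySem.Str.len).foldl max x
      = cs.foldl (fun m r => max m (PySem.Str.len (r.getD j ""))) x := by
  induction cs generalizing x with
  | nil => rfl
  | cons c cs ih =>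
    simp only [List.map_cons, List.foldl_cons]
    rw [ih]

theorem str_format_matrix_py_spec_aux (matrix : List (List Int)) :
    str_format_matrix_py matrix = str_format_matrix_py_alt matrix := by
  unfold str_format_matrix_py str_format_matrix_py_alt
  simp only [pv_minLen_eq]
  have hmap :
      matrix.foldl
        (fun (st : List Int × List (List String)) row =>
          let srow := row.map PySem.Int.toStr
          (List.zipWith (fun a s => if PySem.Str.len s > a then PySem.Str.len s else a) st.1 srow,
           st.2 ++ [srow]))
        (List.replicate (pvMinLen matrix) 0, [])
      = (matrix.map (fun row => row.map PySem.Int.toStr)).foldl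
          (fun (st : List Int × List (List String)) srow =>
            (List.zipWith (fun a s => if PySem.Str.len s > a then PySem.Str.len s else a) st.1 srow,
             st.2 ++ [srow]))
          (List.replicate (pvMinLen matrix) 0, []) :=
    (List.foldl_map (f := fun row => row.map PySem.Int.toStr)
      (g := fun (st : List Int × List (List String)) srow =>
        (List.zipWith (fun a s => if PySem.Str.len s > a then PySem.Str.len s else a) st.1 srow,
         st.2 ++ [srow]))
      (l := matrix) (init := (List.replicate (pvMinLen matrix) 0, []))).symm
  rw [hmap, pv_fold_pair]
  set fmt := matrix.map (fun row => row.map PySem.Int.toStr) with hfmt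
  set n := pvMinLen matrix with hn
  have hfl : ∀ r ∈ fmt, n ≤ r.length := by
    intro r hr
    rcases List.mem_map.mp hr with ⟨row, hrow, rfl⟩
    simpa using pv_minLen_le matrix row hrow
  have hrep : ∀ r ∈ fmt, (List.replicate n (0:Int)).length ≤ r.length := by simpa using hfl
  refine Prod.ext ?_ (by simp)
  dsimp only
  rw [List.map_map]
  apply List.ext_getElem
  · rw [List.length_map, List.length_range, pv_fold_len fmt _ hrep, List.length_replicate]
  · intro j hjA hjB
    have hjn : j < n := by simpa using hjA
    have hlen : j < (fmt.foldl pvZipUpd (List.replicate n 0)).length := hjB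
    rw [List.getElem_map, List.getElem_range]
    dsimp only [Function.comp]
    rw [
        ← List.getD_eq_getElem _ 0 hlen,
        pv_fold_get fmt _ hrep j (by simpa using hjn)]
    have hg : (List.replicate n (0:Int)).getD j 0 = 0 := by
      rw [List.getD_eq_getElem _ _ (by simpa using hjn)]; simp
    rw [hg]
    cases hf : fmt with
    | nil =>
      exfalso
      have hn0 : n = 0 := by
        rw [hn]
        cases hm : matrix with
        | nil => rfl
        | cons m ms => rw [hfmt, hm] at hf; simp at hf
      omega
    | cons c cs =>
      simp only [List.map_cons, pvGenMax, List.foldl_cons]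
      have h0 : max (0:Int) (PySem.Str.len (c.getD j "")) = PySem.Str.len (c.getD j "") := by
        have := pv_len_nonneg (c.getD j "")
        omega
      rw [h0]
      exact pv_foldl_max_map cs j _

-- ===== VERDICT (by name: the statement is the Claim_ definition above) =====
theorem str_format_matrix_py_spec : Claim_equal_str_format_matrix_py := by
  intro matrix _
  unfold Spec_str_format_matrix_py
  exact str_format_matrix_py_spec_aux matrix
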